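-- pv_equiv track=rewrite | github.com/xiongjun19/common_tools | alg/opers/find_repeat.py | find_repeat
-- ===== SOURCE A (Python) =====
-- def find_repeat(seq_arr, repeat_num):
--     m_len = len(seq_arr) // repeat_num
--     if m_len < 1:
--         return None
--     res = {} # begin idx is the key, and val is the length
--     for i in range(len(seq_arr) - repeat_num):
--         _find_repeat_from_begin(seq_arr, repeat_num, m_len, i, res)
--     return res
--
-- def _find_repeat_from_begin(seq_arr, repeat_num, m_len, i, res):
--     for cur_len in range(1, m_len+1):
--         if _is_rep_pat(seq_arr, repeat_num, cur_len, i):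
--             res[i] = cur_len
--
-- def _is_rep_pat(seq_arr, repeat_num, cur_len, i):
--     final_point = repeat_num * cur_len + i
--     if final_point > len(seq_arr):
--         return False
--     sub_arr = seq_arr[i:i+cur_len]
--     for j in range(1, repeat_num):
--         new_start = j * cur_len + i
--         new_sub = seq_arr[new_start:new_start+cur_len]
--         if not _is_equal(sub_arr, new_sub):
--             return False
--     if len(seq_arr) >= final_point + cur_len:
--         if _is_equal(sub_arr, seq_arr[final_point:final_point+cur_len]):
--             return False
--     return True
--
-- def _is_equal(arr, arr2):
--     for x1, x2  in zip(arr, arr2):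
--         if x1 != x2:
--             return False
--     return True
-- ===== SOURCE B (Python) =====
-- def find_repeat(seq_arr, repeat_num):
--     n = len(seq_arr)
--     m_len = n // repeat_num
--     if m_len < 1:
--         return None
--     return {i: L for i in range(n - repeat_num)
--             for L in (_best_len(seq_arr, repeat_num, m_len, i),)
--             if L is not None}
--
--
-- def _best_len(seq_arr, repeat_num, m_len, i):
--     # largest L in 1..m_len such that the block seq_arr[i:i+L] repeats exactly
--     # repeat_num times starting at i (scan downward, first hit wins)
--     n = len(seq_arr)
--     for L in range(m_len, 0, -1):
--         end = i + repeat_num * L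
--         if end > n:
--             continue
--         # all repeat_num blocks equal <=> one shifted-slice comparison
--         if seq_arr[i + L:end] != seq_arr[i:end - L]:
--             continue
--         # a further equal block must not follow
--         if end + L <= n and seq_arr[end:end + L] == seq_arr[i:i + L]:
--             continue
--         return L
--     return None
-- ===== Notes on version B (the rewrite author's own statement) =====
-- stated objective: alternative
-- what changed: Per start index B scans candidate lengths downward and returns the first hit (A records the last hit of an upward scan), replaces A's per-block Python-level element-comparison loop by one shifted-slice periodicity comparison with early exit, and builds the result with a dict comprehension instead of mutating a dict through two helper loops.
import Mathlib
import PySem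

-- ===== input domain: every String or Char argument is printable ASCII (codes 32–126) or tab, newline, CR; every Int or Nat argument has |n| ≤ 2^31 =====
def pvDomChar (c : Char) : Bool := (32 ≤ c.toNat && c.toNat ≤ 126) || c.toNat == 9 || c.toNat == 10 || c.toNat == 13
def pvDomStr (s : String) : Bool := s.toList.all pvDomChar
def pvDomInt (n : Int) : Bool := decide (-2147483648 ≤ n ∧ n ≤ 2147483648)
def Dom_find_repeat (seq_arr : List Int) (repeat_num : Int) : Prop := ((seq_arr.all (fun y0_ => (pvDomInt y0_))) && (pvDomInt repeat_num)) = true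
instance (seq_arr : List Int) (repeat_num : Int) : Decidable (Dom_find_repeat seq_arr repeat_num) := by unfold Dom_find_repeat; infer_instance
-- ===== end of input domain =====

-- B scans candidate lengths downward taking the first hit, checks repetition by one
-- shifted-slice comparison instead of a per-block loop, and builds the dict by
-- comprehension; objective: alternative (a different decomposition of the same search).

-- ===== PORT A =====
def pv_is_equal (arr arr2 : List Int) : Bool :=
  (arr.zip arr2).all (fun p => p.1 == p.2)

def pv_is_rep_pat (seq_arr : List Int) (repeat_num cur_len i : Int) : Bool :=
  let final_point := repeat_num * cur_len + i
  if final_point > PySem.List.len seq_arr then false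
  else
    let sub_arr := PySem.List.slice seq_arr (some i) (some (i + cur_len))
    if (PySem.List.pyRange 1 repeat_num 1).all (fun j =>
        let new_start := j * cur_len + i
        pv_is_equal sub_arr (PySem.List.slice seq_arr (some new_start) (some (new_start + cur_len)))) then
      if PySem.List.len seq_arr ≥ final_point + cur_len then
        if pv_is_equal sub_arr (PySem.List.slice seq_arr (some final_point) (some (final_point + cur_len))) then
          false
        else true
      else true
    else false

def pv_find_repeat_from_begin (seq_arr : List Int) (repeat_num m_len i : Int)
    (res : PySem.Dict Int Int) : PySem.Dict Int Int :=
  (PySem.List.pyRange 1 (m_len + 1) 1).foldl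
    (fun res cur_len =>
      if pv_is_rep_pat seq_arr repeat_num cur_len i then res.insert i cur_len else res) res

def find_repeat (seq_arr : List Int) (repeat_num : Int) : Option (List (Int × Int)) :=
  let m_len := PySem.Int.floordiv (PySem.List.len seq_arr) repeat_num
  if m_len < 1 then none
  else
    some (((PySem.List.pyRange 0 (PySem.List.len seq_arr - repeat_num) 1).foldl
      (fun res i => pv_find_repeat_from_begin seq_arr repeat_num m_len i res)
      PySem.Dict.empty).items)

-- ===== PORT B =====
def pv_best_len (seq_arr : List Int) (repeat_num m_len i : Int) : Option Int :=
  let n := PySem.List.len seq_arr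
  (PySem.List.pyRange m_len 0 (-1)).find? (fun L =>
    let e := i + repeat_num * L
    !(decide (e > n)) &&
    (PySem.List.slice seq_arr (some (i + L)) (some e)
       == PySem.List.slice seq_arr (some i) (some (e - L))) &&
    !((decide (e + L ≤ n)) &&
      (PySem.List.slice seq_arr (some e) (some (e + L))
         == PySem.List.slice seq_arr (some i) (some (i + L)))))

def find_repeat_alt (seq_arr : List Int) (repeat_num : Int) : Option (List (Int × Int)) :=
  let n := PySem.List.len seq_arr
  let m := PySem.Int.floordiv n repeat_num
  if m < 1 then none
  else
    some ((PySem.List.pyRange 0 (n - repeat_num) 1).filterMap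
      (fun i => (pv_best_len seq_arr repeat_num m i).map (fun L => (i, L))))

-- ===== PRECONDITION & SPEC =====
-- Pre_ excludes only repeat_num = 0, on which Python A raises ZeroDivisionError.
def Pre_find_repeat (_seq_arr : List Int) (repeat_num : Int) : Prop := repeat_num ≠ 0
instance (seq_arr : List Int) (repeat_num : Int) : Decidable (Pre_find_repeat seq_arr repeat_num) := by unfold Pre_find_repeat; infer_instance

def pvWitness_find_repeat : List Int × Int := ([1, 1, 1, 1], 2)

def Spec_find_repeat (seq_arr : List Int) (repeat_num : Int) (out : Option (List (Int × Int))) : Prop := out = find_repeat_alt seq_arr repeat_num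
instance (seq_arr : List Int) (repeat_num : Int) (out : Option (List (Int × Int))) : Decidable (Spec_find_repeat seq_arr repeat_num out) := by unfold Spec_find_repeat; infer_instance

-- ===== CLAIM (what is proved, stated in full; the proofs are below) =====
def Claim_equal_find_repeat : Prop := ∀ (seq_arr : List Int) (repeat_num : Int), Dom_find_repeat seq_arr repeat_num → Pre_find_repeat seq_arr repeat_num → Spec_find_repeat seq_arr repeat_num (find_repeat seq_arr repeat_num)

-- ===== LEMMAS AND PROOFS =====

-- zip-based equality is list equality on equal-length lists
lemma pv_is_equal_eq : ∀ (a b : List Int), a.length = b.length → pv_is_equal a b = (a == b)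
  | [], [], _ => by simp [pv_is_equal]
  | [], _ :: _, h => by simp at h
  | _ :: _, [], h => by simp at h
  | x :: a, y :: b, h => by
    simp only [List.length_cons, Nat.add_right_cancel_iff] at h
    simp only [pv_is_equal, List.zip_cons_cons, List.all_cons, List.cons_beq_cons]
    by_cases hxy : (x == y) = true
    · simp only [hxy, Bool.true_and]
      simpa [pv_is_equal] using pv_is_equal_eq a b h
    · simp only [Bool.not_eq_true] at hxy
      simp [hxy]

-- a last-hit fold with accumulator acc is the no-accumulator fold with acc as fallback
lemma lastStep_or (P : Int → Bool) :
    ∀ (Ls : List Int) (acc : Option Int),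
      Ls.foldl (fun a L => if P L then some L else a) acc
        = (Ls.foldl (fun a L => if P L then some L else a) none).or acc := by
  intro Ls
  induction Ls with
  | nil => intro acc; simp
  | cons L Ls ih =>
    intro acc
    simp only [List.foldl_cons]
    rw [ih (if P L then some L else acc), ih (if P L then some L else none)]
    by_cases h : P L = true <;> simp [h]

-- the last hit of a scan is the first hit of the reversed scan
lemma lastStep_eq_find_rev (P : Int → Bool) :
    ∀ Ls : List Int,
      Ls.foldl (fun a L => if P L then some L else a) none = Ls.reverse.find? P := by
  intro Ls
  induction Ls with
  | nil => simp
  | cons L Ls ih =>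
    simp only [List.foldl_cons, List.reverse_cons]
    rw [lastStep_or, ih, List.find?_append]
    by_cases h : P L = true <;> simp [List.find?, h]

-- A's conditional-insert loop at one fixed key equals a single optional insert
lemma foldl_insert_opt (P : Int → Bool) (i : Int) :
    ∀ (Ls : List Int) (res : PySem.Dict Int Int),
      Ls.foldl (fun r L => if P L then r.insert i L else r) res
        = match Ls.foldl (fun a L => if P L then some L else a) none with
          | none => res
          | some L => res.insert i L := by
  intro Ls
  induction Ls with
  | nil => intro res; simp
  | cons L Ls ih =>
    intro res
    simp only [List.foldl_cons]
    rw [lastStep_or]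
    by_cases h : P L = true
    · simp only [h, if_pos]
      rw [ih]
      cases hrec : Ls.foldl (fun a L => if P L then some L else a) none with
      | none => simp
      | some L' => simp [PySem.Dict.insert_insert_self]
    · simp only [h]
      rw [ih]
      cases hrec : Ls.foldl (fun a L => if P L then some L else a) none with
      | none => simp
      | some L' => simp

lemma find?_congr (l : List Int) (p q : Int → Bool) (h : ∀ x ∈ l, p x = q x) :
    l.find? p = l.find? q := by
  induction l with
  | nil => rfl
  | cons x l ih =>
    simp only [List.find?]
    rw [h x (List.mem_cons_self)]
    cases q x
    · exact ih (fun y hy => h y (List.mem_cons_of_mem _ hy))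
    · rfl

-- equality of two equal-length segments, pointwise
lemma seg_eq_iff (xs : List Int) (a b t : Nat) (ha : a + t ≤ xs.length) (hb : b + t ≤ xs.length) :
    (xs.drop a).take t = (xs.drop b).take t
      ↔ ∀ k, (hk : k < t) → xs[a + k]'(by omega) = xs[b + k]'(by omega) := by
  constructor
  · intro h k hk
    have hka : k < ((xs.drop a).take t).length := by
      simp [List.length_take, List.length_drop]; omega
    have hkb : k < ((xs.drop b).take t).length := by
      simp [List.length_take, List.length_drop]; omega
    have h1 : ((xs.drop a).take t)[k]'hka = ((xs.drop b).take t)[k]'hkb := by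
      simp only [h]
    simpa [List.getElem_take, List.getElem_drop] using h1
  · intro h
    apply List.ext_getElem
    · simp [List.length_take, List.length_drop]; omega
    · intro k hk1 hk2
      have hkt : k < t := by
        simp [List.length_take, List.length_drop] at hk1; omega
      simpa [List.getElem_take, List.getElem_drop] using h k hkt


-- index congruence for list getElem
lemma getE (xs : List Int) {a b : Nat} (h : a = b) (ha : a < xs.length) :
    xs[a]'ha = xs[b]'(h ▸ ha) := by
  subst h; rfl

-- core periodicity fact: one shifted-segment comparison ⟺ every block equals block 0
lemma period_core (xs : List Int) (p l r : Nat) (hl : 1 ≤ l) (hr : 1 ≤ r)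
    (hfit : p + r * l ≤ xs.length) :
    ((xs.drop (p + l)).take ((r - 1) * l) = (xs.drop p).take ((r - 1) * l))
      ↔ (∀ j, 1 ≤ j → j < r → (xs.drop (p + j * l)).take l = (xs.drop p).take l) := by
  have hrl : (r - 1) * l + l = r * l := by
    have h1 : r - 1 + 1 = r := by omega
    calc (r - 1) * l + l = (r - 1 + 1) * l := by ring
      _ = r * l := by rw [h1]
  have hll : l ≤ r * l := Nat.le_mul_of_pos_left l (by omega)
  have hfit1 : (p + l) + (r - 1) * l ≤ xs.length := by omega
  have hfit2 : p + (r - 1) * l ≤ xs.length := by omega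
  have hblockfit : ∀ j, j < r → p + j * l + l ≤ xs.length := by
    intro j hj
    have h1 : j + 1 ≤ r := by omega
    have h2 : (j + 1) * l ≤ r * l := Nat.mul_le_mul_right l h1
    have h3 : j * l + l = (j + 1) * l := by ring
    omega
  rw [seg_eq_iff xs (p + l) p ((r - 1) * l) hfit1 hfit2]
  constructor
  · -- shifted pointwise equality ⟹ all blocks equal block 0
    intro H j
    induction j with
    | zero => intro h1; omega
    | succ j ih =>
      intro _ hjr
      have hbf := hblockfit (j + 1) hjr
      rw [seg_eq_iff xs (p + (j + 1) * l) p l (by omega) (by omega)]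
      intro k hk
      have hx : j * l + k < (r - 1) * l := by
        have h1 : j + 1 ≤ r - 1 := by omega
        have h2 : (j + 1) * l ≤ (r - 1) * l := Nat.mul_le_mul_right l h1
        have h3 : j * l + l = (j + 1) * l := by ring
        omega
      have step := H (j * l + k) hx
      have main : xs[p + (j + 1) * l + k]'(by omega) = xs[p + (j * l + k)]'(by omega) := by
        rw [getE xs (show p + (j + 1) * l + k = p + l + (j * l + k) by ring)]
        exact step
      by_cases hj0 : j = 0
      · rw [main]
        exact getE xs (by subst hj0; ring) _
      · have hbfj := hblockfit j (by omega)
        have prev := ih (by omega) (by omega)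
        rw [seg_eq_iff xs (p + j * l) p l (by omega) (by omega)] at prev
        rw [main, getE xs (show p + (j * l + k) = p + j * l + k by ring)]
        exact prev k hk
  · -- all blocks equal block 0 ⟹ shifted pointwise equality
    intro H x hx
    set j := x / l with hj
    set k := x % l with hk
    have hdm := Nat.div_add_mod x l
    have hxeq : x = j * l + k := by
      rw [hj, hk, Nat.mul_comm]
      exact hdm.symm
    have hkl : k < l := Nat.mod_lt _ (by omega)
    have hjl_le : j * l ≤ x := by rw [hxeq]; exact Nat.le_add_right _ _
    have hjr : j + 1 < r := by
      by_contra hcon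
      have h1 : r - 1 ≤ j := by omega
      have h2 : (r - 1) * l ≤ j * l := Nat.mul_le_mul_right l h1
      linarith
    have hb1 := hblockfit (j + 1) (by omega)
    have hb := H (j + 1) (Nat.le_add_left 1 j) hjr
    rw [seg_eq_iff xs (p + (j + 1) * l) p l (by omega) (by omega)] at hb
    have h1 : xs[p + l + x]'(by omega) = xs[p + k]'(by omega) := by
      rw [getE xs (show p + l + x = p + (j + 1) * l + k by rw [hxeq]; ring)]
      exact hb k hkl
    have h2 : xs[p + x]'(by omega) = xs[p + k]'(by omega) := by
      by_cases hj0 : j = 0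
      · exact getE xs (by rw [hxeq, hj0]; ring) _
      · have hbfj := hblockfit j (by omega)
        have hbj := H j (Nat.one_le_iff_ne_zero.mpr hj0) (Nat.lt_of_succ_lt hjr)
        rw [seg_eq_iff xs (p + j * l) p l (by omega) (by omega)] at hbj
        rw [getE xs (show p + x = p + j * l + k by rw [hxeq]; ring)]
        exact hbj k hkl
    rw [h1, h2]

-- A's per-start validity test equals B's slice-based test (for positive rep and L, nonneg i)
lemma pred_eq (xs : List Int) (rep L i : Int) (hi : 0 ≤ i) (hrep : 1 ≤ rep) (hL : 1 ≤ L) :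
    pv_is_rep_pat xs rep L i =
      (!(decide (i + rep * L > PySem.List.len xs)) &&
       (PySem.List.slice xs (some (i + L)) (some (i + rep * L))
          == PySem.List.slice xs (some i) (some (i + rep * L - L))) &&
       !((decide (i + rep * L + L ≤ PySem.List.len xs)) &&
         (PySem.List.slice xs (some (i + rep * L)) (some (i + rep * L + L))
            == PySem.List.slice xs (some i) (some (i + L))))) := by
  unfold pv_is_rep_pat
  simp only [PySem.List.len_eq]
  by_cases hgt : rep * L + i > (xs.length : Int)
  · rw [if_pos hgt]
    have hd : decide (i + rep * L > (xs.length : Int)) = true := by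
      apply decide_eq_true; omega
    simp [hd]
  · rw [if_neg hgt]
    lift i to ℕ using hi with p
    lift L to ℕ using (by omega) with l
    lift rep to ℕ using (by omega) with r
    have hl1 : 1 ≤ l := by exact_mod_cast hL
    have hr1 : 1 ≤ r := by exact_mod_cast hrep
    have hfit : p + r * l ≤ xs.length := by
      have : ((r * l + p : ℕ) : Int) ≤ (xs.length : Int) := by push_cast; omega
      omega
    have hll : l ≤ r * l := Nat.le_mul_of_pos_left l (by omega)
    -- cast normalisations for every slice bound
    have c1 : (p : Int) + l = ((p + l : ℕ) : Int) := by push_cast; ring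
    have c2 : (p : Int) + r * l = ((p + r * l : ℕ) : Int) := by push_cast; ring
    have c3 : (p : Int) + r * l - l = ((p + r * l - l : ℕ) : Int) := by
      have : l ≤ p + r * l := by omega
      push_cast [this]
      ring
    have c4 : (p : Int) + r * l + l = ((p + r * l + l : ℕ) : Int) := by push_cast; ring
    have c5 : (r : Int) * l + p = ((r * l + p : ℕ) : Int) := by push_cast; ring
    have c6 : (r : Int) * l + p + l = ((r * l + p + l : ℕ) : Int) := by push_cast; ring
    -- B-side first conjunct is true
    have hd : decide ((p : Int) + r * l > (xs.length : Int)) = false := by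
      simp only [decide_eq_false_iff_not]; omega
    rw [hd]
    -- the middle pieces
    have hsub : PySem.List.slice xs (some (p : Int)) (some ((p : Int) + l))
        = (xs.drop p).take l := by
      rw [c1, PySem.List.slice_natCast]
      congr 1
      omega
    have hlen_seg : ∀ a : ℕ, a + l ≤ xs.length → ((xs.drop a).take l).length = l := by
      intro a ha
      simp [List.length_take, List.length_drop]
      omega
    have hshiftL : PySem.List.slice xs (some ((p : Int) + l)) (some ((p : Int) + r * l))
        = (xs.drop (p + l)).take ((r - 1) * l) := by
      rw [c1, c2, PySem.List.slice_natCast]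
      congr 1
      have : (r - 1) * l = r * l - l := by
        cases r with
        | zero => omega
        | succ r' => simp [Nat.succ_mul]
      omega
    have hshiftR : PySem.List.slice xs (some (p : Int)) (some ((p : Int) + r * l - l))
        = (xs.drop p).take ((r - 1) * l) := by
      rw [c3, PySem.List.slice_natCast]
      congr 1
      have : (r - 1) * l = r * l - l := by
        cases r with
        | zero => omega
        | succ r' => simp [Nat.succ_mul]
      omega
    have hext : PySem.List.slice xs (some ((p : Int) + r * l)) (some ((p : Int) + r * l + l))
        = (xs.drop (p + r * l)).take l := by
      rw [c2, show ((p + r * l : ℕ) : Int) + l = ((p + r * l + l : ℕ) : Int) from by push_cast; ring,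
        PySem.List.slice_natCast]
      congr 1
      omega
    have hfinal : PySem.List.slice xs (some ((r : Int) * l + p)) (some ((r : Int) * l + p + l))
        = (xs.drop (p + r * l)).take l := by
      rw [c5, show ((r * l + p : ℕ) : Int) + l = ((r * l + p + l : ℕ) : Int) from by push_cast; ring,
        PySem.List.slice_natCast]
      rw [show r * l + p = p + r * l from by omega]
      congr 1
      omega
    have hEq_true_iff : ∀ a b : List Int, a.length = b.length → (pv_is_equal a b = true ↔ a = b) := by
      intro a b h
      rw [pv_is_equal_eq a b h, beq_iff_eq]
    have hAall : ((PySem.List.pyRange 1 (r : Int)).all (fun j =>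
          pv_is_equal (PySem.List.slice xs (some (p : Int)) (some ((p : Int) + l)))
            (PySem.List.slice xs (some (j * l + p)) (some (j * l + p + l)))) = true)
        ↔ (∀ jn : ℕ, 1 ≤ jn → jn < r → (xs.drop (p + jn * l)).take l = (xs.drop p).take l) := by
      rw [List.all_eq_true]
      have hblock : ∀ jn : ℕ, jn < r →
          PySem.List.slice xs (some ((jn : Int) * l + p)) (some ((jn : Int) * l + p + l))
            = (xs.drop (p + jn * l)).take l := by
        intro jn hjn
        rw [show ((jn : Int)) * l + p = ((p + jn * l : ℕ) : Int) from by push_cast; ring,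
          show ((p + jn * l : ℕ) : Int) + l = ((p + jn * l + l : ℕ) : Int) from by push_cast; ring,
          PySem.List.slice_natCast]
        congr 1
        omega
      have hblockfitn : ∀ jn : ℕ, jn < r → p + jn * l + l ≤ xs.length := by
        intro jn hjn
        have h1 : jn + 1 ≤ r := by omega
        have h2 : (jn + 1) * l ≤ r * l := Nat.mul_le_mul_right l h1
        have h3 : jn * l + l = (jn + 1) * l := by ring
        omega
      constructor
      · intro h jn h1 h2
        have hm : ((jn : Int)) ∈ PySem.List.pyRange 1 (r : Int) := by
          rw [PySem.List.mem_pyRange_one]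
          constructor
          · exact_mod_cast h1
          · exact_mod_cast h2
        have hj := h _ hm
        rw [hsub, hblock jn h2] at hj
        have := (hEq_true_iff _ _ (by rw [hlen_seg p (by omega), hlen_seg _ (hblockfitn jn h2)])).mp hj
        exact this.symm
      · intro h j hm
        rw [PySem.List.mem_pyRange_one] at hm
        obtain ⟨hm1, hm2⟩ := hm
        lift j to ℕ using (by omega) with jn
        have h1 : 1 ≤ jn := by exact_mod_cast hm1
        have h2 : jn < r := by exact_mod_cast hm2
        rw [hsub, hblock jn h2]
        exact (hEq_true_iff _ _ (by rw [hlen_seg p (by omega), hlen_seg _ (hblockfitn jn h2)])).mpr (h jn h1 h2).symm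
    have hextfit_iff : ((xs.length : Int) ≥ (r : Int) * l + p + l) ↔ (p + r * l + l ≤ xs.length) := by
      constructor <;> intro h
      · have : ((r * l + p + l : ℕ) : Int) ≤ (xs.length : Int) := by push_cast; omega
        omega
      · omega
    by_cases hB : (∀ jn : ℕ, 1 ≤ jn → jn < r → (xs.drop (p + jn * l)).take l = (xs.drop p).take l)
    · rw [hsub] at hAall ⊢
      rw [if_pos (hAall.mpr hB)]
      have hshift : (xs.drop (p + l)).take ((r - 1) * l) = (xs.drop p).take ((r - 1) * l) :=
        (period_core xs p l r hl1 hr1 hfit).mpr hB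
      rw [hshiftL, hshiftR, show ((xs.drop (p + l)).take ((r - 1) * l) == (xs.drop p).take ((r - 1) * l)) = true from beq_iff_eq.mpr hshift]
      simp only [Bool.not_false, Bool.true_and]
      by_cases hg : ((xs.length : Int) ≥ (r : Int) * l + p + l)
      · rw [if_pos hg, hext, hfinal]
        have hgn : p + r * l + l ≤ xs.length := hextfit_iff.mp hg
        rw [show decide ((p : Int) + r * l + l ≤ (xs.length : Int)) = true from decide_eq_true (by omega)]
        by_cases heq : (xs.drop p).take l = (xs.drop (p + r * l)).take l
        · rw [if_pos ((hEq_true_iff _ _ (by rw [hlen_seg p (by omega), hlen_seg _ (by omega)])).mpr heq)]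
          rw [show ((xs.drop (p + r * l)).take l == (xs.drop p).take l) = true from beq_iff_eq.mpr heq.symm]
          rfl
        · rw [if_neg (fun hc => heq ((hEq_true_iff _ _ (by rw [hlen_seg p (by omega), hlen_seg _ (by omega)])).mp hc))]
          rw [show ((xs.drop (p + r * l)).take l == (xs.drop p).take l) = false from by
            rw [beq_eq_false_iff_ne]; exact fun hc => heq hc.symm]
          rfl
      · rw [if_neg hg]
        rw [show decide ((p : Int) + r * l + l ≤ (xs.length : Int)) = false from by
          rw [decide_eq_false_iff_not]
          intro hc
          exact hg (hextfit_iff.mpr (by omega))]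
        rfl
    · rw [hsub] at hAall ⊢
      rw [if_neg (fun hc => hB (hAall.mp hc))]
      have hshift : ¬ ((xs.drop (p + l)).take ((r - 1) * l) = (xs.drop p).take ((r - 1) * l)) :=
        fun hc => hB ((period_core xs p l r hl1 hr1 hfit).mp hc)
      rw [hshiftL, hshiftR, show ((xs.drop (p + l)).take ((r - 1) * l) == (xs.drop p).take ((r - 1) * l)) = false from by
        rw [beq_eq_false_iff_ne]; exact hshift]
      rfl

-- A's inner helper equals a single optional insert of B's best length
lemma from_begin_eq (xs : List Int) (rep m i : Int) (hi : 0 ≤ i) (hrep : 1 ≤ rep)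
    (res : PySem.Dict Int Int) :
    pv_find_repeat_from_begin xs rep m i res =
      match pv_best_len xs rep m i with
      | none => res
      | some L => res.insert i L := by
  unfold pv_find_repeat_from_begin pv_best_len
  rw [foldl_insert_opt, lastStep_eq_find_rev]
  have hrev : (PySem.List.pyRange 1 (m + 1) 1).reverse = PySem.List.pyRange m 0 (-1) := by
    rw [PySem.List.pyRange_neg_one_eq_reverse]
    norm_num
  rw [hrev]
  have hcong := find?_congr (PySem.List.pyRange m 0 (-1))
    (fun L => pv_is_rep_pat xs rep L i)
    (fun L =>
      !(decide (i + rep * L > PySem.List.len xs)) &&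
      (PySem.List.slice xs (some (i + L)) (some (i + rep * L))
         == PySem.List.slice xs (some i) (some (i + rep * L - L))) &&
      !((decide (i + rep * L + L ≤ PySem.List.len xs)) &&
        (PySem.List.slice xs (some (i + rep * L)) (some (i + rep * L + L))
           == PySem.List.slice xs (some i) (some (i + L)))))
    (by
      intro L hL
      rw [PySem.List.mem_pyRange_neg_one] at hL
      exact pred_eq xs rep L i hi hrep (by omega))
  rw [hcong]

-- the outer loop over distinct fresh keys appends one item per hit
lemma foldl_match_items (best : Int → Option Int) :
    ∀ (idxs : List Int) (d : PySem.Dict Int Int), idxs.Nodup →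
      (∀ i ∈ idxs, d.contains i = false) →
      (idxs.foldl (fun d i => match best i with | none => d | some L => d.insert i L) d).items
        = d.items ++ idxs.filterMap (fun i => (best i).map (fun L => (i, L))) := by
  intro idxs
  induction idxs with
  | nil => intro d _ _; simp
  | cons i idxs ih =>
    intro d hnd hfresh
    simp only [List.foldl_cons, List.filterMap_cons]
    cases hbi : best i with
    | none =>
      simp only []
      rw [ih d (List.Nodup.of_cons hnd) (fun j hj => hfresh j (List.mem_cons_of_mem _ hj))]
      simp
    | some L =>
      simp only []
      rw [ih (d.insert i L) (List.Nodup.of_cons hnd) (by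
        intro j hj
        rw [PySem.Dict.contains_insert]
        have hne : j ≠ i := by
          intro hc
          subst hc
          exact (List.nodup_cons.mp hnd).1 hj
        simp [hne, hfresh j (List.mem_cons_of_mem _ hj)])]
      rw [PySem.Dict.items_insert_of_not_contains d L (hfresh i List.mem_cons_self)]
      simp

-- a nonnegative length floor-divided by a negative count is not positive
lemma floordiv_nonpos_of_neg (n rep : Int) (hn : 0 ≤ n) (hrep : rep < 0) :
    PySem.Int.floordiv n rep ≤ 0 := by
  have hmb := PySem.Int.mod_neg_bounds n hrep
  have hfm := PySem.Int.floordiv_mul_add_mod n rep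
  by_contra hc
  have hc' : 1 ≤ PySem.Int.floordiv n rep := by omega
  nlinarith [hc', hmb.1, hmb.2]

-- ===== VERDICT (by name: the statement is the Claim_ definition above) =====
theorem find_repeat_spec : Claim_equal_find_repeat := by
  intro seq_arr repeat_num _hdom hpre
  unfold Spec_find_repeat
  unfold find_repeat find_repeat_alt
  dsimp only
  by_cases hm : PySem.Int.floordiv (PySem.List.len seq_arr) repeat_num < 1
  · rw [if_pos hm, if_pos hm]
  · rw [if_neg hm, if_neg hm]
    have hrep : 1 ≤ repeat_num := by
      rcases lt_trichotomy repeat_num 0 with h | h | h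
      · exfalso
        have := floordiv_nonpos_of_neg (PySem.List.len seq_arr) repeat_num
          (by rw [PySem.List.len_eq]; positivity) h
        omega
      · exact absurd h hpre
      · omega
    congr 1
    rw [PySem.List.foldl_congr_mem _ _
      (fun d i => match pv_best_len seq_arr repeat_num
          (PySem.Int.floordiv (PySem.List.len seq_arr) repeat_num) i with
        | none => d
        | some L => d.insert i L)
      PySem.Dict.empty
      (by
        intro acc i hi_
        rw [PySem.List.mem_pyRange_one] at hi_
        exact from_begin_eq seq_arr repeat_num _ i hi_.1 hrep acc)]
    rw [foldl_match_items _ _ _ (PySem.List.nodup_pyRange_one _ _)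
      (by intro i _; rfl)]
    rfl
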